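-- pv_equiv track=rewrite | github.com/umcu/EchoLabeler | src/medcat_utils.py | _get_token_groups
-- ===== SOURCE A (Python) =====
-- def _get_token_groups(bnds):
--     '''
--     :param bnds: list of character ranges
--     :return: sequence of numbers describing the # of the consequence
--     '''
--
--     # if difference between lower-bound and previous upper-bound is >2
--     # then we go the next sequence
--
--     seqnumbers = []
--     seqdict = {}
--     seqnum = 0
--     i_b = 0  # index of the first token in the current sequence  # start of the sequence in the token list (bnds)
--     old_bound = (0, 0)
--     for i, bnd in enumerate(bnds):
--         if (bnd[0] - old_bound[1]) > 2:
--             seqdict[seqnum] = {'start_token': i_b, 'end_token': i - 1, 'size': i - 1 - i_b}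
--             seqnum += 1
--             i_b = i
--         old_bound = bnd
--         seqnumbers.append(seqnum)
--
--     return seqnumbers, seqdict
-- ===== SOURCE B (Python) =====
-- def _get_token_groups(bnds):
--     # Break-index decomposition: compute gap flags once, then prefix-sum them
--     # for seqnumbers and pair consecutive break positions for seqdict.
--     prev_ends = [0] + [b[1] for b in bnds[:-1]]
--     flags = [1 if bnd[0] - pe > 2 else 0 for bnd, pe in zip(bnds, prev_ends)]
--     seqnumbers = []
--     total = 0
--     for f in flags:
--         total += f
--         seqnumbers.append(total)
--     breaks = [i for i, f in enumerate(flags) if f]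
--     seqdict = {}
--     for k, (s, b) in enumerate(zip([0] + breaks[:-1], breaks)):
--         seqdict[k] = {'start_token': s, 'end_token': b - 1, 'size': b - 1 - s}
--     return seqnumbers, seqdict
-- ===== Notes on version B (the rewrite author's own statement) =====
-- stated objective: alternative
-- what changed: B replaces A's single stateful loop (running seqnum, i_b, old_bound, in-loop dict writes) by a pipeline: compute a 0/1 gap-flag list in one pass, take its prefix sums for seqnumbers, extract break indices, and build seqdict by pairing consecutive break positions.
import Mathlib
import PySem

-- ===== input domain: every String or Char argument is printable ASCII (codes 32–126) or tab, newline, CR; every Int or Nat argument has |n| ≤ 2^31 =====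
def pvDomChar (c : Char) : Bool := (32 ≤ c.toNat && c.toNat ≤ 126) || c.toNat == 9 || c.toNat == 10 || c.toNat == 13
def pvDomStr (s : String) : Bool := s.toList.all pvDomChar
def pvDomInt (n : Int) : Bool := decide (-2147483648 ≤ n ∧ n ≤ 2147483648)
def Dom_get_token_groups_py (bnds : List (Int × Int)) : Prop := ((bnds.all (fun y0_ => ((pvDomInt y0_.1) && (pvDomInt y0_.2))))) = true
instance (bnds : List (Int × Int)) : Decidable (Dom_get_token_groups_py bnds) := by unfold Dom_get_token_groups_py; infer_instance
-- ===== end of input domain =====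

-- B rebuilds the result from a one-pass gap-flag list: prefix sums give seqnumbers and
-- consecutive break indices give seqdict (objective: alternative decomposition, same cost).

-- ===== PORT A =====
def get_token_groups_py (bnds : List (Int × Int)) : List Int × (List (Int × List (String × Int))) :=
  let st := (PySem.List.enumerate bnds).foldl
    (fun (st : List Int × PySem.Dict Int (List (String × Int)) × Int × Int × (Int × Int)) ib =>
      let i := ib.1
      let bnd := ib.2
      let seqnumbers := st.1
      let seqdict := st.2.1
      let seqnum := st.2.2.1
      let i_b := st.2.2.2.1
      let old_bound := st.2.2.2.2
      let st' :=
        if bnd.1 - old_bound.2 > 2 then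
          (seqdict.insert seqnum
             [("start_token", i_b), ("end_token", i - 1), ("size", i - 1 - i_b)],
           seqnum + 1, i)
        else (seqdict, seqnum, i_b)
      (seqnumbers ++ [st'.2.1], st'.1, st'.2.1, st'.2.2, bnd))
    ([], PySem.Dict.empty, 0, 0, ((0 : Int), (0 : Int)))
  (st.1, st.2.1.items)

-- ===== PORT B =====
def get_token_groups_py_alt (bnds : List (Int × Int)) : List Int × (List (Int × List (String × Int))) :=
  let prev_ends : List Int := 0 :: bnds.dropLast.map (fun b => b.2)
  let flags : List Int := (bnds.zip prev_ends).map (fun p => if p.1.1 - p.2 > 2 then 1 else 0)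
  let seqnumbers := (flags.foldl (fun (st : Int × List Int) f => (st.1 + f, st.2 ++ [st.1 + f])) (0, [])).2
  let breaks : List Int := ((PySem.List.enumerate flags).filter (fun p => p.2 != 0)).map (fun p => p.1)
  let seqdict := (PySem.List.enumerate (((0 : Int) :: breaks.dropLast).zip breaks)).foldl
    (fun (d : PySem.Dict Int (List (String × Int))) kp =>
      d.insert kp.1
        [("start_token", kp.2.1), ("end_token", kp.2.2 - 1), ("size", kp.2.2 - 1 - kp.2.1)])
    PySem.Dict.empty
  (seqnumbers, seqdict.items)

-- ===== PRECONDITION & SPEC =====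
def Spec_get_token_groups_py (bnds : List (Int × Int)) (out : List Int × (List (Int × List (String × Int)))) : Prop := out = get_token_groups_py_alt bnds
instance (bnds : List (Int × Int)) (out : List Int × (List (Int × List (String × Int)))) : Decidable (Spec_get_token_groups_py bnds out) := by unfold Spec_get_token_groups_py; infer_instance

-- ===== CLAIM (what is proved, stated in full; the proofs are below) =====
def Claim_equal_get_token_groups_py : Prop := ∀ (bnds : List (Int × Int)), Dom_get_token_groups_py bnds → Spec_get_token_groups_py bnds (get_token_groups_py bnds)

-- ===== LEMMAS AND PROOFS =====

-- gap flags of the list, given the previous upper bound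
def pvFlags (pe : Int) : List (Int × Int) → List Int
  | [] => []
  | b :: r => (if b.1 - pe > 2 then 1 else 0) :: pvFlags b.2 r

-- running prefix sums starting from t
def pvSums (t : Int) : List Int → List Int
  | [] => []
  | f :: r => (t + f) :: pvSums (t + f) r

-- indices (from i) of the nonzero flags
def pvBreaks (i : Int) : List Int → List Int
  | [] => []
  | f :: r => if f != 0 then i :: pvBreaks (i + 1) r else pvBreaks (i + 1) r

-- seqdict entries produced while scanning flags from index i with current seq number / start
def pvEntries (seqnum i_b i : Int) : List Int → List (Int × List (String × Int))
  | [] => []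
  | f :: r =>
    if f != 0 then
      (seqnum, [("start_token", i_b), ("end_token", i - 1), ("size", i - 1 - i_b)]) ::
        pvEntries (seqnum + 1) i (i + 1) r
    else pvEntries seqnum i_b (i + 1) r

-- A's loop body, named so the invariant lemma can speak about it (defeq to the lambda in the port)
def pvStep (st : List Int × PySem.Dict Int (List (String × Int)) × Int × Int × (Int × Int))
    (ib : Int × (Int × Int)) :
    List Int × PySem.Dict Int (List (String × Int)) × Int × Int × (Int × Int) :=
  let i := ib.1
  let bnd := ib.2
  let seqnumbers := st.1
  let seqdict := st.2.1
  let seqnum := st.2.2.1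
  let i_b := st.2.2.2.1
  let old_bound := st.2.2.2.2
  let st' :=
    if bnd.1 - old_bound.2 > 2 then
      (seqdict.insert seqnum
         [("start_token", i_b), ("end_token", i - 1), ("size", i - 1 - i_b)],
       seqnum + 1, i)
    else (seqdict, seqnum, i_b)
  (seqnumbers ++ [st'.2.1], st'.1, st'.2.1, st'.2.2, bnd)

theorem pv_A_loop (bnds : List (Int × Int)) : ∀ (s : Int) (nums : List Int)
    (d : PySem.Dict Int (List (String × Int))) (seqnum i_b : Int) (old : Int × Int),
    (∀ k, d.contains k = true → k < seqnum) →
    ((PySem.List.enumerate bnds s).foldl pvStep (nums, d, seqnum, i_b, old)).1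
        = nums ++ pvSums seqnum (pvFlags old.2 bnds)
    ∧ ((PySem.List.enumerate bnds s).foldl pvStep (nums, d, seqnum, i_b, old)).2.1.items
        = d.items ++ pvEntries seqnum i_b s (pvFlags old.2 bnds) := by
  induction bnds with
  | nil =>
    intro s nums d seqnum i_b old hinv
    simp [PySem.List.enumerate_nil, pvFlags, pvSums, pvEntries]
  | cons b r ih =>
    intro s nums d seqnum i_b old hinv
    rw [PySem.List.enumerate_cons, List.foldl_cons]
    by_cases h : b.1 - old.2 > 2
    · have hstep : pvStep (nums, d, seqnum, i_b, old) (s, b)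
          = (nums ++ [seqnum + 1],
             d.insert seqnum [("start_token", i_b), ("end_token", s - 1), ("size", s - 1 - i_b)],
             seqnum + 1, s, b) := by
        simp [pvStep, h]
      have hfresh : d.contains seqnum = false := by
        by_contra hc
        have : d.contains seqnum = true := by
          cases hcv : d.contains seqnum with
          | true => rfl
          | false => exact absurd hcv hc
        exact absurd (hinv seqnum this) (by omega)
      have hinv' : ∀ k, (d.insert seqnum
          [("start_token", i_b), ("end_token", s - 1), ("size", s - 1 - i_b)]).contains k = true
          → k < seqnum + 1 := by
        intro k hk
        rw [PySem.Dict.contains_insert] at hk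
        rcases Bool.or_eq_true_iff.mp hk with hk | hk
        · have : k = seqnum := by exact_mod_cast eq_of_beq hk
          omega
        · have := hinv k hk
          omega
      obtain ⟨h1, h2⟩ := ih (s + 1) (nums ++ [seqnum + 1]) _ (seqnum + 1) s b hinv'
      rw [hstep]
      constructor
      · rw [h1]
        simp [pvFlags, pvSums, h]
      · rw [h2, PySem.Dict.items_insert_of_not_contains]
        · simp [pvFlags, pvEntries, h]
        · exact hfresh
    · have hstep : pvStep (nums, d, seqnum, i_b, old) (s, b)
          = (nums ++ [seqnum], d, seqnum, i_b, b) := by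
        simp [pvStep, h]
      obtain ⟨h1, h2⟩ := ih (s + 1) (nums ++ [seqnum]) d seqnum i_b b hinv
      rw [hstep]
      constructor
      · rw [h1]; simp [pvFlags, pvSums, h]
      · rw [h2]; simp [pvFlags, pvEntries, h]

theorem pv_B_sums (flags : List Int) : ∀ (t : Int) (acc : List Int),
    (flags.foldl (fun (st : Int × List Int) f => (st.1 + f, st.2 ++ [st.1 + f])) (t, acc)).2
      = acc ++ pvSums t flags := by
  induction flags with
  | nil => intro t acc; simp [pvSums]
  | cons f r ih => intro t acc; simp [List.foldl, pvSums, ih]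

theorem pv_B_breaks (flags : List Int) : ∀ (s : Int),
    ((PySem.List.enumerate flags s).filter (fun p => p.2 != 0)).map (fun p => p.1)
      = pvBreaks s flags := by
  induction flags with
  | nil => intro s; simp [PySem.List.enumerate_nil, pvBreaks]
  | cons f r ih =>
    intro s
    rw [PySem.List.enumerate_cons]
    by_cases h : f = 0
    · simp [h, pvBreaks, ih]
    · have ht : ((s, f).2 != 0) = true := by simp [h]
      rw [List.filter_cons, if_pos ht]
      simp [pvBreaks, h, ih]

theorem pv_zip_step (b : Int × Int) (r : List (Int × Int)) (pe : Int) :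
    (b :: r).zip (pe :: (b :: r).dropLast.map (fun x => x.2))
      = (b, pe) :: r.zip (b.2 :: r.dropLast.map (fun x => x.2)) := by
  cases r with
  | nil => rfl
  | cons c r' => rfl

theorem pv_B_flags (bnds : List (Int × Int)) : ∀ (pe : Int),
    (bnds.zip (pe :: bnds.dropLast.map (fun b => b.2))).map
      (fun p => if p.1.1 - p.2 > 2 then (1 : Int) else 0) = pvFlags pe bnds := by
  induction bnds with
  | nil => intro pe; simp [pvFlags]
  | cons b r ih =>
    intro pe
    rw [pv_zip_step, List.map_cons, ih b.2]
    rfl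

theorem pv_breaks_step (b r : List Int) (x i_b : Int) (h : b = x :: r) :
    (i_b :: b.dropLast).zip b = (i_b, x) :: (x :: r.dropLast).zip r := by
  subst h
  cases r with
  | nil => rfl
  | cons c r' => rfl

theorem pv_B_pairs (flags : List Int) : ∀ (k i_b i : Int),
    (PySem.List.enumerate ((i_b :: (pvBreaks i flags).dropLast).zip (pvBreaks i flags)) k).map
      (fun kp => (kp.1,
        [("start_token", kp.2.1), ("end_token", kp.2.2 - 1), ("size", kp.2.2 - 1 - kp.2.1)]))
      = pvEntries k i_b i flags := by
  induction flags with
  | nil => intro k i_b i; simp [pvBreaks, pvEntries, PySem.List.enumerate_nil]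
  | cons f r ih =>
    intro k i_b i
    by_cases h : f = 0
    · have hb : pvBreaks i (f :: r) = pvBreaks (i + 1) r := by simp [pvBreaks, h]
      have he : pvEntries k i_b i (f :: r) = pvEntries k i_b (i + 1) r := by
        simp [pvEntries, h]
      rw [hb, he, ih]
    · have hb : pvBreaks i (f :: r) = i :: pvBreaks (i + 1) r := by simp [pvBreaks, h]
      have he : pvEntries k i_b i (f :: r)
          = (k, [("start_token", i_b), ("end_token", i - 1), ("size", i - 1 - i_b)]) ::
              pvEntries (k + 1) i (i + 1) r := by
        simp [pvEntries, h]
      rw [hb, he, pv_breaks_step _ _ _ _ rfl, PySem.List.enumerate_cons, List.map_cons,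
        ih (k + 1) i (i + 1)]

theorem pv_dict_fold (ps : List (Int × Int)) : ∀ (k : Int)
    (d : PySem.Dict Int (List (String × Int))),
    (∀ j, d.contains j = true → j < k) →
    ((PySem.List.enumerate ps k).foldl
      (fun (d : PySem.Dict Int (List (String × Int))) kp =>
        d.insert kp.1
          [("start_token", kp.2.1), ("end_token", kp.2.2 - 1), ("size", kp.2.2 - 1 - kp.2.1)])
      d).items
      = d.items ++ (PySem.List.enumerate ps k).map
          (fun kp => (kp.1,
            [("start_token", kp.2.1), ("end_token", kp.2.2 - 1), ("size", kp.2.2 - 1 - kp.2.1)])) := by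
  induction ps with
  | nil => intro k d hinv; simp [PySem.List.enumerate_nil]
  | cons p r ih =>
    intro k d hinv
    rw [PySem.List.enumerate_cons, List.foldl_cons, List.map_cons]
    have hfresh : d.contains k = false := by
      by_contra hc
      have : d.contains k = true := by
        cases hcv : d.contains k with
        | true => rfl
        | false => exact absurd hcv hc
      exact absurd (hinv k this) (by omega)
    have hinv' : ∀ j, (d.insert k
        [("start_token", p.1), ("end_token", p.2 - 1), ("size", p.2 - 1 - p.1)]).contains j = true
        → j < k + 1 := by
      intro j hj
      rw [PySem.Dict.contains_insert] at hj
      rcases Bool.or_eq_true_iff.mp hj with hj | hj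
      · have : j = k := by exact_mod_cast eq_of_beq hj
        omega
      · have := hinv j hj
        omega
    rw [ih (k + 1) _ hinv', PySem.Dict.items_insert_of_not_contains]
    · simp
    · exact hfresh

theorem pv_alt_eq (bnds : List (Int × Int)) :
    get_token_groups_py_alt bnds
      = (pvSums 0 (pvFlags 0 bnds), pvEntries 0 0 0 (pvFlags 0 bnds)) := by
  simp only [get_token_groups_py_alt]
  rw [pv_B_flags bnds 0, pv_B_sums, pv_B_breaks, pv_dict_fold _ 0 _ (by intro j hj; simp at hj),
    pv_B_pairs]
  simp [PySem.Dict.empty]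

theorem pv_a_eq (bnds : List (Int × Int)) :
    get_token_groups_py bnds
      = (pvSums 0 (pvFlags 0 bnds), pvEntries 0 0 0 (pvFlags 0 bnds)) := by
  obtain ⟨h1, h2⟩ := pv_A_loop bnds 0 [] PySem.Dict.empty 0 0 ((0 : Int), (0 : Int))
    (by intro k hk; simp at hk)
  show (((PySem.List.enumerate bnds 0).foldl pvStep
      ([], PySem.Dict.empty, 0, 0, ((0 : Int), (0 : Int)))).1,
    ((PySem.List.enumerate bnds 0).foldl pvStep
      ([], PySem.Dict.empty, 0, 0, ((0 : Int), (0 : Int)))).2.1.items) = _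
  rw [h1, h2]
  simp [PySem.Dict.empty]

-- ===== VERDICT (by name: the statement is the Claim_ definition above) =====
theorem get_token_groups_py_spec : Claim_equal_get_token_groups_py := by
  intro bnds _
  unfold Spec_get_token_groups_py
  rw [pv_a_eq, pv_alt_eq]
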